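-- pv_equiv track=rewrite | github.com/mrleongalaxyum/manet-dev | rpi5/rpi5-install/usr/local/bin/halow-mcs-summary.py | station_blocks
-- ===== SOURCE A (Python) =====
-- def station_blocks(text):
--     blocks = []
--     current = []
--     for line in (text or '').splitlines():
--         if line.startswith('Station '):
--             if current:
--                 blocks.append(current)
--             current = [line]
--         elif current:
--             current.append(line)
--     if current:
--         blocks.append(current)
--     return blocks
-- ===== SOURCE B (Python) =====
-- def station_blocks(text):
--     lines = (text or '').splitlines()
--     idx = [i for i, l in enumerate(lines) if l.startswith('Station ')]
--     return [lines[a:b] for a, b in zip(idx, idx[1:] + [len(lines)])]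
-- ===== Notes on version B (the rewrite author's own statement) =====
-- stated objective: alternative
-- what changed: Replaces the incremental accumulator loop (mutable current/blocks) with a two-phase index-then-slice shape: collect the boundary indices of 'Station ' lines, then emit the slices between consecutive boundaries.
import Mathlib
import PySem

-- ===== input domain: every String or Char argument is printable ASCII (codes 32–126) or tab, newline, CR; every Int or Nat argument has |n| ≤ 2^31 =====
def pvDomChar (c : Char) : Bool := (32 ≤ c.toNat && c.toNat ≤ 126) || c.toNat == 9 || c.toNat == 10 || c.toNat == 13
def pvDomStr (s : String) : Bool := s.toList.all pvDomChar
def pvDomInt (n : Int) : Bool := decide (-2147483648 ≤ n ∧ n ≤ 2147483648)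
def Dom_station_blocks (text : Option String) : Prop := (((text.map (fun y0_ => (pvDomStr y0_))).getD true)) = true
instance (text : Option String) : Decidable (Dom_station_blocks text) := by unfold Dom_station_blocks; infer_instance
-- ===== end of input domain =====

-- B replaces A's incremental accumulator loop by an index-then-slice decomposition; same O(n) cost.

-- ===== PORT A =====
def station_blocks (text : Option String) : List (List String) :=
  let acc := (PySem.Str.splitlines (text.getD "")).foldl
    (fun (acc : List (List String) × List String) line =>
      if PySem.Str.startswith line "Station " then
        ((if acc.2 = [] then acc.1 else acc.1 ++ [acc.2]), [line])
      else if acc.2 = [] then acc else (acc.1, acc.2 ++ [line]))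
    ([], [])
  if acc.2 = [] then acc.1 else acc.1 ++ [acc.2]

-- ===== PORT B =====
def station_blocks_alt (text : Option String) : List (List String) :=
  let lines := PySem.Str.splitlines (text.getD "")
  let idx : List Int := ((PySem.List.enumerate lines 0).filter
      (fun p => PySem.Str.startswith p.2 "Station ")).map (fun p => p.1)
  (idx.zip (PySem.List.slice idx (some 1) none ++ [(lines.length : Int)])).map
    (fun p => PySem.List.slice lines (some p.1) (some p.2))

-- ===== PRECONDITION & SPEC =====
def Spec_station_blocks (text : Option String) (out : List (List String)) : Prop := out = station_blocks_alt text
instance (text : Option String) (out : List (List String)) : Decidable (Spec_station_blocks text out) := by unfold Spec_station_blocks; infer_instance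

-- ===== CLAIM (what is proved, stated in full; the proofs are below) =====
def Claim_equal_station_blocks : Prop := ∀ (text : Option String), Dom_station_blocks text → Spec_station_blocks text (station_blocks text)

-- ===== LEMMAS AND PROOFS =====

-- "is a 'Station ' header line"
def stLine (l : String) : Bool := PySem.Str.startswith l "Station "

-- canonical recursive form of the grouping, the proof's middle point
def gBlocks : List String → List (List String)
  | [] => []
  | x :: ls =>
    if stLine x then
      (x :: ls.takeWhile (fun l => !stLine l)) :: gBlocks (ls.dropWhile (fun l => !stLine l))
    else gBlocks ls
termination_by ls => ls.length
decreasing_by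
  · simpa using Nat.lt_succ_of_le (ls.length_dropWhile_le _)
  · simp

theorem gBlocks_dropWhile (ls : List String) :
    gBlocks (ls.dropWhile (fun l => !stLine l)) = gBlocks ls := by
  induction ls with
  | nil => rfl
  | cons x ls ih =>
    by_cases h : stLine x
    · simp [List.dropWhile_cons, h]
    · simp [List.dropWhile_cons, h, gBlocks, ih]

-- ---- A = gBlocks ----

def aStep (acc : List (List String) × List String) (line : String) :
    List (List String) × List String :=
  if PySem.Str.startswith line "Station " then
    ((if acc.2 = [] then acc.1 else acc.1 ++ [acc.2]), [line])
  else if acc.2 = [] then acc else (acc.1, acc.2 ++ [line])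

theorem a_foldl_eq (lines : List String) :
    ∀ (bs : List (List String)) (c : List String),
    (if (lines.foldl aStep (bs, c)).2 = [] then (lines.foldl aStep (bs, c)).1
     else (lines.foldl aStep (bs, c)).1 ++ [(lines.foldl aStep (bs, c)).2]) =
    bs ++ (if c = [] then gBlocks lines
           else (c ++ lines.takeWhile (fun l => !stLine l)) ::
                gBlocks (lines.dropWhile (fun l => !stLine l))) := by
  induction lines with
  | nil =>
    intro bs c
    by_cases hc : c = [] <;> simp [gBlocks, hc]
  | cons x ls ih =>
    intro bs c
    by_cases hx : stLine x
    · have hst : PySem.Str.startswith x "Station " = true := hx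
      by_cases hc : c = []
      · have h1 : aStep (bs, c) x = (bs, [x]) := by simp only [aStep, hst]; simp [hc]
        rw [List.foldl_cons, h1, ih bs [x]]
        simp [gBlocks, hx, hc]
      · have h1 : aStep (bs, c) x = (bs ++ [c], [x]) := by simp only [aStep, hst]; simp [hc]
        rw [List.foldl_cons, h1, ih (bs ++ [c]) [x]]
        simp [gBlocks, hx, hc, List.takeWhile_cons, List.dropWhile_cons]
    · have hst : PySem.Str.startswith x "Station " = false := by
        simpa [stLine] using hx
      by_cases hc : c = []
      · have h1 : aStep (bs, c) x = (bs, c) := by simp only [aStep, hst]; simp [hc]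
        rw [List.foldl_cons, h1, ih bs c]
        simp [hc, List.takeWhile_cons, List.dropWhile_cons, gBlocks, hx]
      · have h1 : aStep (bs, c) x = (bs, c ++ [x]) := by simp only [aStep, hst]; simp [hc]
        have hcx : ¬ c ++ [x] = [] := by simp
        rw [List.foldl_cons, h1, ih bs (c ++ [x])]
        simp [hc, hcx, List.takeWhile_cons, List.dropWhile_cons, hx]

theorem a_eq_g (lines : List String) :
    (let acc := lines.foldl aStep ([], []);
     if acc.2 = [] then acc.1 else acc.1 ++ [acc.2]) = gBlocks lines := by
  simpa using a_foldl_eq lines [] []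

-- ---- B = gBlocks ----

-- natural-number boundary indices, structurally
def natIdx : List String → List Nat
  | [] => []
  | x :: ls => if stLine x then 0 :: (natIdx ls).map (· + 1) else (natIdx ls).map (· + 1)

theorem enumerate_shift {α : Type} (xs : List α) (s : Int) :
    PySem.List.enumerate xs (s + 1) =
      (PySem.List.enumerate xs s).map (fun p => (p.1 + 1, p.2)) := by
  induction xs generalizing s with
  | nil => simp [PySem.List.enumerate_nil]
  | cons x xs ih =>
    rw [PySem.List.enumerate_cons, PySem.List.enumerate_cons]
    simp only [List.map_cons]
    rw [show s + 1 + 1 = (s + 1) + 1 by ring, ih (s + 1)]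

theorem natIdx_cons_pos (x : String) (ls : List String) (hx : stLine x = true) :
    natIdx (x :: ls) = 0 :: (natIdx ls).map (· + 1) := by simp [natIdx, hx]

theorem natIdx_cons_neg (x : String) (ls : List String) (hx : stLine x = false) :
    natIdx (x :: ls) = (natIdx ls).map (· + 1) := by simp [natIdx, hx]

theorem idx_eq_natIdx (lines : List String) :
    ((PySem.List.enumerate lines 0).filter
        (fun p => PySem.Str.startswith p.2 "Station ")).map (fun p => p.1) =
      (natIdx lines).map Int.ofNat := by
  rw [show (fun p : Int × String => PySem.Str.startswith p.2 "Station ") =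
      (fun p : Int × String => stLine p.2) from rfl]
  induction lines with
  | nil => simp [PySem.List.enumerate_nil, natIdx]
  | cons x ls ih =>
    rw [PySem.List.enumerate_cons, enumerate_shift, List.filter_cons]
    have key : ((((PySem.List.enumerate ls 0).map
          (fun p : Int × String => (p.1 + 1, p.2))).filter
            (fun p => stLine p.2)).map (fun p => p.1)) =
        (((PySem.List.enumerate ls 0).filter (fun p => stLine p.2)).map
          (fun p => p.1)).map (fun n => n + 1) := by
      rw [List.filter_map,
        show ((fun p : Int × String => stLine p.2) ∘
            (fun p : Int × String => (p.1 + 1, p.2))) =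
          (fun p : Int × String => stLine p.2) from rfl]
      simp [List.map_map, Function.comp]
    by_cases hx : stLine x
    · rw [natIdx_cons_pos x ls hx]
      simp [hx, key, ih, List.map_map, Function.comp]
    · rw [natIdx_cons_neg x ls (by simpa using hx)]
      simp [hx, key, ih, List.map_map, Function.comp]

-- mathematical slicing form of B's body
def chop (lines : List String) (ix : List Nat) : List (List String) :=
  (ix.zip (ix.tail ++ [lines.length])).map (fun p => (lines.drop p.1).take (p.2 - p.1))

theorem natIdx_nil_iff (ls : List String) :
    natIdx ls = [] ↔ ∀ l ∈ ls, stLine l = false := by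
  induction ls with
  | nil => simp [natIdx]
  | cons x ls ih =>
    by_cases hx : stLine x <;> simp [natIdx, hx, ih]

theorem natIdx_head (ls : List String) (i : Nat) (is : List Nat) (h : natIdx ls = i :: is) :
    ls.take i = ls.takeWhile (fun l => !stLine l) ∧
    ls.drop i = ls.dropWhile (fun l => !stLine l) := by
  induction ls generalizing i is with
  | nil => simp [natIdx] at h
  | cons x ls ih =>
    by_cases hx : stLine x
    · rw [natIdx_cons_pos x ls hx] at h
      obtain ⟨h1, _⟩ := List.cons_eq_cons.mp h
      subst h1
      simp [List.takeWhile_cons, List.dropWhile_cons, hx]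
    · rw [natIdx_cons_neg x ls (by simpa using hx)] at h
      cases hn : natIdx ls with
      | nil => rw [hn] at h; simp at h
      | cons i' is' =>
        rw [hn, List.map_cons] at h
        obtain ⟨h1, _⟩ := List.cons_eq_cons.mp h
        subst h1
        obtain ⟨t1, t2⟩ := ih i' is' hn
        simp [List.takeWhile_cons, List.dropWhile_cons, hx, t1, t2]

-- shifting all indices by one and consing a line leaves the chopped slices unchanged
theorem zip_shift_slices (x : String) (ls : List String) (a b : List Nat) :
    ((a.map (· + 1)).zip (b.map (· + 1))).map
        (fun p => ((x :: ls).drop p.1).take (p.2 - p.1)) =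
      (a.zip b).map (fun p => (ls.drop p.1).take (p.2 - p.1)) := by
  rw [List.zip_map, List.map_map]
  apply List.map_congr_left
  intro p _
  simp [Prod.map, Nat.succ_sub_succ]

theorem chop_eq_g (lines : List String) : chop lines (natIdx lines) = gBlocks lines := by
  induction lines with
  | nil => simp [chop, natIdx, gBlocks]
  | cons x ls ih =>
    by_cases hx : stLine x
    · have eg : gBlocks (x :: ls) =
          (x :: ls.takeWhile (fun l => !stLine l)) ::
            gBlocks (ls.dropWhile (fun l => !stLine l)) := by
        simp [gBlocks, hx]
      cases hn : natIdx ls with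
      | nil =>
        have hall := (natIdx_nil_iff ls).1 hn
        have htw : ls.takeWhile (fun l => !stLine l) = ls :=
          List.takeWhile_eq_self_iff.2 (by intro a ha; simp [hall a ha])
        have hdw : ls.dropWhile (fun l => !stLine l) = [] :=
          List.dropWhile_eq_nil_iff.2 (by intro a ha; simp [hall a ha])
        rw [eg, htw, hdw]
        rw [show natIdx (x :: ls) = [0] by rw [natIdx_cons_pos x ls hx, hn]; rfl]
        simp [chop, gBlocks, List.take_of_length_le]
      | cons i is =>
        obtain ⟨t1, _⟩ := natIdx_head ls i is hn
        rw [eg]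
        rw [show natIdx (x :: ls) = 0 :: ((i :: is).map (· + 1)) by
          rw [natIdx_cons_pos x ls hx, hn]]
        simp only [chop, List.map_cons, List.tail_cons, List.length_cons,
          List.cons_append, List.zip_cons_cons]
        rw [show is.map (· + 1) ++ [ls.length + 1] =
            (is ++ [ls.length]).map (· + 1) by simp]
        rw [show ((i + 1) :: is.map (· + 1)) = ((i :: is).map (· + 1)) from rfl]
        rw [zip_shift_slices x ls (i :: is) (is ++ [ls.length])]
        rw [List.cons_eq_cons]
        refine ⟨?_, ?_⟩
        · rw [show i + 1 - 0 = i + 1 by omega]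
          simp [List.take_succ_cons, t1]
        · rw [show gBlocks (List.dropWhile (fun l => !stLine l) ls) =
              chop ls (i :: is) from by
            rw [gBlocks_dropWhile, ← ih, chop, hn, List.tail_cons]; rfl]
          rfl
    · rw [show gBlocks (x :: ls) = gBlocks ls by simp [gBlocks, hx]]
      rw [natIdx_cons_neg x ls (by simpa using hx)]
      rw [show chop (x :: ls) ((natIdx ls).map (· + 1)) =
          (((natIdx ls).map (· + 1)).zip
            (((natIdx ls).tail ++ [ls.length]).map (· + 1))).map
            (fun p => ((x :: ls).drop p.1).take (p.2 - p.1)) from by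
        rw [chop]
        simp [List.map_tail]]
      rw [zip_shift_slices x ls (natIdx ls) ((natIdx ls).tail ++ [ls.length])]
      rw [← ih, chop]

theorem b_eq_g (lines : List String) :
    (let idx : List Int := ((PySem.List.enumerate lines 0).filter
        (fun p => PySem.Str.startswith p.2 "Station ")).map (fun p => p.1);
     (idx.zip (PySem.List.slice idx (some 1) none ++ [(lines.length : Int)])).map
       (fun p => PySem.List.slice lines (some p.1) (some p.2))) = gBlocks lines := by
  simp only [idx_eq_natIdx, PySem.List.slice_from_one]
  rw [show ((natIdx lines).map Int.ofNat).tail ++ [(lines.length : Int)] =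
      ((natIdx lines).tail ++ [lines.length]).map Int.ofNat by
    simp [List.map_tail, Int.ofNat_eq_natCast]]
  rw [List.zip_map, List.map_map]
  rw [show ((fun p : Int × Int => PySem.List.slice lines (some p.1) (some p.2)) ∘
        Prod.map Int.ofNat Int.ofNat) =
      (fun p : Nat × Nat => (lines.drop p.1).take (p.2 - p.1)) from by
    funext p
    simp [Prod.map, Int.ofNat_eq_natCast, PySem.List.slice_natCast]]
  exact chop_eq_g lines

-- ===== VERDICT (by name: the statement is the Claim_ definition above) =====
theorem station_blocks_spec : Claim_equal_station_blocks := by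
  intro text _
  unfold Spec_station_blocks station_blocks station_blocks_alt
  rw [b_eq_g]
  exact a_eq_g _
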